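-- pv_equiv track=rewrite | github.com/willizdev/compuba | Algoritmos/Introducción a la Programación/Python/Guías/ Guía 7 - Funciones sobre listas (tipos complejos) /p7.py | reemplaza_vocales
-- ===== SOURCE A (Python) =====
-- def pertenece(s: list[int], e: int) -> bool:
--     for i in s:
--         if e == i:
--             return True
--     return False
--
-- def reemplaza_vocales(s: str) -> str:
--     res: str = ""
--     for c in s:
--         if pertenece("aeiou", c):
--             res += '_'
--             continue
--         res += c
--     return res
-- ===== SOURCE B (Python) =====
-- def reemplaza_vocales(s: str) -> str:
--     # Five staged whole-string passes, one per vowel; no membership test at all.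
--     # Correct because '_' is not a vowel, so later passes never touch earlier replacements.
--     for v in "aeiou":
--         s = s.replace(v, "_")
--     return s
-- ===== Notes on version B (the rewrite author's own statement) =====
-- stated objective: alternative
-- what changed: Replaced the single char-by-char accumulation scan with a linear membership helper by five staged whole-string str.replace passes, one per vowel; no per-character membership test remains, and the passes do not interfere because the replacement character is not a vowel.
import Mathlib
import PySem

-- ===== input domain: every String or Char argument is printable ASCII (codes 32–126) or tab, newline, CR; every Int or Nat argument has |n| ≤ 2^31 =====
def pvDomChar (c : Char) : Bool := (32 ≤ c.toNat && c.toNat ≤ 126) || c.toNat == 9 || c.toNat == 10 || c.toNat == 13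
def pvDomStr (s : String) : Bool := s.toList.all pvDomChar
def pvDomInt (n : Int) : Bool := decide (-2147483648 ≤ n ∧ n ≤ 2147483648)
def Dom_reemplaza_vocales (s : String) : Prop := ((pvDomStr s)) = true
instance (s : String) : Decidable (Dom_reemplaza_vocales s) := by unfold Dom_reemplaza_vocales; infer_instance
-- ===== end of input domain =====

-- B replaces A's single char-by-char accumulation scan (with its linear membership helper)
-- by five staged whole-string str.replace passes, one per vowel (objective: alternative).

-- ===== PORT A =====
-- helper 'pertenece': linear scan, early return on match
def pertenece (s : List Char) (e : Char) : Bool :=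
  match s with
  | [] => false
  | i :: rest => if e == i then true else pertenece rest e

-- accumulate 'res' character by character, as A's loop does
def reemplaza_vocales (s : String) : String :=
  String.ofList (s.toList.foldl
    (fun res c => if pertenece "aeiou".toList c then res ++ ['_'] else res ++ [c]) [])

-- ===== PORT B =====
-- for v in "aeiou": s = s.replace(v, "_")
def reemplaza_vocales_alt (s : String) : String :=
  "aeiou".toList.foldl (fun s v => PySem.Str.replace s (String.ofList [v]) "_") s

-- ===== PRECONDITION & SPEC =====
def Spec_reemplaza_vocales (s : String) (out : String) : Prop := out = reemplaza_vocales_alt s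
instance (s : String) (out : String) : Decidable (Spec_reemplaza_vocales s out) := by unfold Spec_reemplaza_vocales; infer_instance

-- ===== CLAIM =====
def Claim_equal_reemplaza_vocales : Prop := ∀ (s : String), Dom_reemplaza_vocales s → Spec_reemplaza_vocales s (reemplaza_vocales s)

-- ===== LEMMAS AND PROOFS =====

-- single-char replace is a pointwise map
theorem pv_go_single (v r : Char) (fuel : Nat) (l acc : List Char) (h : l.length ≤ fuel) :
    PySem.Chars.replace.go [v] [r] fuel l acc
      = acc.reverse ++ l.map (fun c => if c = v then r else c) := by
  induction fuel generalizing l acc with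
  | zero =>
      have : l = [] := List.length_eq_zero_iff.mp (Nat.le_zero.mp h)
      subst this; simp [PySem.Chars.replace.go]
  | succ n ih =>
      cases l with
      | nil => simp [PySem.Chars.replace.go]
      | cons c t =>
          simp only [PySem.Chars.replace.go]
          by_cases hc : c = v
          · subst hc
            rw [if_pos (by simp [List.isPrefixOf])]
            rw [ih _ _ (by simpa using Nat.le_of_succ_le_succ h)]
            simp
          · rw [if_neg (by simp [List.isPrefixOf, Ne.symm hc])]
            rw [ih _ _ (by simpa using Nat.le_of_succ_le_succ h)]
            simp [hc]

theorem pv_replace_single (v r : Char) (l : List Char) :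
    PySem.Chars.replace l [v] [r] = l.map (fun c => if c = v then r else c) := by
  rw [PySem.Chars.replace]
  simp only [List.isEmpty_cons]
  exact pv_go_single v r l.length l [] le_rfl

-- A's accumulation loop is a pointwise map too
theorem pv_fold_eq (l : List Char) (acc : List Char) :
    l.foldl (fun res c => if pertenece "aeiou".toList c then res ++ ['_'] else res ++ [c]) acc
      = acc ++ l.map (fun c => if pertenece "aeiou".toList c then '_' else c) := by
  induction l generalizing acc with
  | nil => simp
  | cons c t ih =>
      simp only [List.foldl, List.map]
      split <;> rw [ih] <;> simp

-- the five staged passes compose to A's per-character decision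
def pvRep (v c : Char) : Char := if c = v then '_' else c

theorem pv_stage_eq (c : Char) :
    pvRep 'u' (pvRep 'o' (pvRep 'i' (pvRep 'e' (pvRep 'a' c))))
      = (if pertenece "aeiou".toList c then '_' else c) := by
  by_cases h1 : c = 'a' <;> by_cases h2 : c = 'e' <;> by_cases h3 : c = 'i' <;>
    by_cases h4 : c = 'o' <;> by_cases h5 : c = 'u' <;>
    simp_all [pvRep, pertenece]

-- ===== VERDICT =====
set_option maxHeartbeats 1000000 in
theorem reemplaza_vocales_spec : Claim_equal_reemplaza_vocales := by
  intro s _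
  unfold Spec_reemplaza_vocales reemplaza_vocales reemplaza_vocales_alt
  rw [pv_fold_eq]
  have hv : "aeiou".toList = ['a','e','i','o','u'] := rfl
  rw [hv]
  have hu : "_".toList = ['_'] := rfl
  simp only [List.foldl, PySem.Str.replace, String.toList_ofList, hu,
    pv_replace_single, List.map_map, List.nil_append]
  congr 1
  apply List.map_congr_left
  intro c _
  symm
  show pvRep 'u' (pvRep 'o' (pvRep 'i' (pvRep 'e' (pvRep 'a' c)))) = _
  rw [pv_stage_eq, hv]
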